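-- pv_equiv track=rewrite | github.com/rubelw/OSSS | src/OSSS/ai/agents/query_data/handlers/evaluation_sections_handler.py | _select_evaluation_sections_fields
-- ===== SOURCE A (Python) =====
-- from typing import Any, Dict, List, Sequence
--
-- def _select_evaluation_sections_fields(
--     rows: Sequence[Dict[str, Any]],
-- ) -> List[str]:
--     if not rows:
--         return []
--
--     preferred_order = [
--         "id",
--         "evaluation_template_id",
--         "template_code",
--         "section_code",
--         "name",
--         "short_name",
--         "description",
--         "sequence",
--         "weight",              # contribution to overall score
--         "max_score",
--         "rubric_group",
--         "is_required",
--         "is_active",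
--         "school_year",
--         "created_at",
--         "updated_at",
--     ]
--
--     all_keys: List[str] = []
--     for r in rows:
--         for k in r.keys():
--             if k not in all_keys:
--                 all_keys.append(k)
--
--     ordered = [k for k in preferred_order if k in all_keys]
--     ordered.extend(k for k in all_keys if k not in ordered)
--     return ordered
-- ===== SOURCE B (Python) =====
-- def _select_evaluation_sections_fields(rows):
--     if not rows:
--         return []
--
--     preferred_order = [
--         "id",
--         "evaluation_template_id",
--         "template_code",
--         "section_code",
--         "name",
--         "short_name",
--         "description",
--         "sequence",
--         "weight",
--         "max_score",
--         "rubric_group",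
--         "is_required",
--         "is_active",
--         "school_year",
--         "created_at",
--         "updated_at",
--     ]
--
--     keys = list(dict.fromkeys(k for r in rows for k in r.keys()))
--     n = len(preferred_order)
--
--     def rank(k):
--         try:
--             return preferred_order.index(k)
--         except ValueError:
--             return n + keys.index(k)
--
--     return sorted(keys, key=rank)
-- ===== Notes on version B (the rewrite author's own statement) =====
-- stated objective: faster
-- what changed: B deduplicates the keys in one flatten+dict.fromkeys pass and produces the final ordering by a single sort under a composite rank (position in preferred_order, else preferred-list length plus first-seen position), instead of A's two phases of repeated-membership accumulation, filtering preferred_order and extending with the leftover keys.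
import Mathlib
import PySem

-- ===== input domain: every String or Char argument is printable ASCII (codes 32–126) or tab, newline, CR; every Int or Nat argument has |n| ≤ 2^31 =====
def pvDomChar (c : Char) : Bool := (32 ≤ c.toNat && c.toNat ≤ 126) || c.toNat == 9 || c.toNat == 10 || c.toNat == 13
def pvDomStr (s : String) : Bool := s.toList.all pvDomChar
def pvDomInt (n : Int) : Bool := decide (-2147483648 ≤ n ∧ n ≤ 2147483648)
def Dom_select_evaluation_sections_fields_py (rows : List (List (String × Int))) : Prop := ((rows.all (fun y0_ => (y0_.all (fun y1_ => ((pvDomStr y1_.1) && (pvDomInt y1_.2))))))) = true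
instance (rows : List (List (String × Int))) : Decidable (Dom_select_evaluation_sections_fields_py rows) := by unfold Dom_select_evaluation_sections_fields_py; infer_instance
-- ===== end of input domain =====

-- B replaces A's two filter/extend passes over an accumulated key list by one dedup pass plus a
-- single sort under a composite rank (preferred position, else offset first-seen position).

-- the preferred_order literal shared by both sources
def pvPreferred : List String :=
  ["id", "evaluation_template_id", "template_code", "section_code", "name", "short_name",
   "description", "sequence", "weight", "max_score", "rubric_group", "is_required",
   "is_active", "school_year", "created_at", "updated_at"]

-- ===== PORT A =====
def select_evaluation_sections_fields_py (rows : List (List (String × Int))) : List String :=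
  if rows = [] then []
  else
    let all_keys : List String :=
      rows.foldl (fun acc r =>
        r.foldl (fun acc kv => if acc.contains kv.1 then acc else acc ++ [kv.1]) acc) []
    let ordered : List String := pvPreferred.filter (fun k => all_keys.contains k)
    all_keys.foldl (fun acc k => if acc.contains k then acc else acc ++ [k]) ordered

-- ===== PORT B =====
def select_evaluation_sections_fields_py_alt (rows : List (List (String × Int))) : List String :=
  if rows = [] then []
  else
    let keys : List String := PySem.List.dedup (rows.flatMap (fun r => r.map Prod.fst))
    let n : Int := (pvPreferred.length : Int)
    let rank : String → Int := fun k =>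
      match PySem.List.index? pvPreferred k with
      | some i => (i : Int)
      -- keys.index(k): k is always a member of keys here, so the `.getD 0` default is never used
      | none => n + ((PySem.List.index? keys k).getD 0 : Int)
    PySem.List.sorted keys rank false

-- ===== PRECONDITION & SPEC =====
def Spec_select_evaluation_sections_fields_py (rows : List (List (String × Int))) (out : List String) : Prop := out = select_evaluation_sections_fields_py_alt rows
instance (rows : List (List (String × Int))) (out : List String) : Decidable (Spec_select_evaluation_sections_fields_py rows out) := by unfold Spec_select_evaluation_sections_fields_py; infer_instance

-- ===== CLAIM (what is proved, stated in full; the proofs are below) =====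
def Claim_equal_select_evaluation_sections_fields_py : Prop := ∀ (rows : List (List (String × Int))), Dom_select_evaluation_sections_fields_py rows → Spec_select_evaluation_sections_fields_py rows (select_evaluation_sections_fields_py rows)

-- ===== LEMMAS AND PROOFS =====

lemma pv_index?_of_mem (l : List String) (a : String) (h : a ∈ l) :
    PySem.List.index? l a = some (List.idxOf a l) := by
  rw [PySem.List.index?_eq_idxOf?]
  cases h' : List.idxOf? a l with
  | none =>
    have := List.isSome_idxOf?.mpr h
    rw [h'] at this
    simp at this
  | some i =>
    rw [List.idxOf_eq_getD_idxOf?, h']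
    rfl

lemma pv_index?_of_not_mem (l : List String) (a : String) (h : a ∉ l) :
    PySem.List.index? l a = none := by
  rw [PySem.List.index?_eq_idxOf?]
  cases h' : List.idxOf? a l with
  | none => rfl
  | some i =>
    have : (List.idxOf? a l).isSome = true := by rw [h']; rfl
    exact absurd (List.isSome_idxOf?.mp this) h

-- A's key-accumulation loop is an ordered dedup (Set.ofList) of the flattened key sequence
lemma allkeys_eq_ofList (rows : List (List (String × Int))) (init : List String) :
    rows.foldl (fun acc r =>
        r.foldl (fun acc kv => if acc.contains kv.1 then acc else acc ++ [kv.1]) acc) init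
      = (rows.flatMap (fun r => r.map Prod.fst)).foldl PySem.Set.add init := by
  induction rows generalizing init with
  | nil => rfl
  | cons r rows ih =>
    simp only [List.foldl_cons, List.flatMap_cons, List.foldl_append]
    rw [ih]
    congr 1
    rw [List.foldl_map]
    rfl

-- A's extend-with-membership-check loop over a duplicate-free list appends exactly the unseen elements
lemma foldl_add_nodup (ks : List String) (init : List String) (h : ks.Nodup) :
    ks.foldl (fun acc k => if acc.contains k then acc else acc ++ [k]) init
      = init ++ ks.filter (fun k => !init.contains k) := by
  induction ks generalizing init with
  | nil => simp
  | cons k ks ih =>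
    obtain ⟨hk, hnd⟩ := List.nodup_cons.mp h
    simp only [List.foldl_cons, List.filter_cons]
    by_cases hc : init.contains k
    · have hcc : (!init.contains k) = false := by rw [hc]; rfl
      rw [if_pos hc, ih _ hnd, hcc]
      simp
    · have hcf : init.contains k = false := by simpa using hc
      have hcc : (!init.contains k) = true := by rw [hcf]; rfl
      rw [if_neg hc, ih _ hnd, hcc]
      have heq : ks.filter (fun x => !(init ++ [k]).contains x)
           = ks.filter (fun x => !init.contains x) := by
        apply List.filter_congr
        intro x hx
        have hxk : x ≠ k := fun hxe => hk (hxe ▸ hx)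
        simp [List.contains_eq_mem, hxk]
      rw [heq]
      simp
  -- note: the growing accumulator never affects later membership tests because ks is duplicate-free

-- a duplicate-free list is strictly increasing under its own idxOf
lemma pairwise_idxOf_lt (l : List String) (h : l.Nodup) :
    l.Pairwise (fun a b => List.idxOf a l < List.idxOf b l) := by
  rw [List.pairwise_iff_getElem]
  intro i j hi hj hij
  rw [h.idxOf_getElem i hi, h.idxOf_getElem j hj]
  exact hij

-- the heart of the equivalence: sorting the distinct keys by the composite rank produces exactly
-- "preferred keys in preferred order, then the remaining keys in first-seen order"
lemma sorted_rank_eq (ks : List String) (hnd : ks.Nodup) :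
    PySem.List.sorted ks (fun k =>
      match PySem.List.index? pvPreferred k with
      | some i => (i : Int)
      | none => (pvPreferred.length : Int) + ((PySem.List.index? ks k).getD 0 : Int)) false
    = pvPreferred.filter (fun k => ks.contains k)
      ++ ks.filter (fun k => !(pvPreferred.filter (fun k => ks.contains k)).contains k) := by
  have hprefnd : pvPreferred.Nodup := by decide
  set rnk : String → Int := fun k =>
    match PySem.List.index? pvPreferred k with
    | some i => (i : Int)
    | none => (pvPreferred.length : Int) + ((PySem.List.index? ks k).getD 0 : Int) with hrnk
  set ordered : List String := pvPreferred.filter (fun k => ks.contains k) with hord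
  -- rank characterisations
  have hr1 : ∀ a ∈ pvPreferred, rnk a = (List.idxOf a pvPreferred : Int) := by
    intro a ha
    simp only [hrnk, pv_index?_of_mem _ _ ha]
  have hr2 : ∀ b ∈ ks, b ∉ pvPreferred →
      rnk b = (pvPreferred.length : Int) + (List.idxOf b ks : Int) := by
    intro b hb hnp
    simp only [hrnk, pv_index?_of_not_mem _ _ hnp, pv_index?_of_mem _ _ hb, Option.getD_some]
  -- the second filter can ignore the accumulated `ordered`
  have hfiltereq : ks.filter (fun k => !ordered.contains k)
      = ks.filter (fun k => !pvPreferred.contains k) := by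
    apply List.filter_congr
    intro x hx
    simp [hord, List.contains_eq_mem, List.mem_filter, hx]
  rw [hfiltereq]
  apply PySem.List.sorted_eq_of_perm_of_pairwise_lt
  · -- permutation
    have h1 : ordered.Perm (ks.filter (fun k => pvPreferred.contains k)) := by
      rw [List.perm_ext_iff_of_nodup (hprefnd.filter _) (hnd.filter _)]
      intro a
      simp [List.mem_filter, List.contains_eq_mem]
      tauto
    exact (h1.append_right _).trans
      (List.filter_append_perm (fun k => pvPreferred.contains k) ks)
  · -- strictly increasing ranks
    rw [List.pairwise_append]
    refine ⟨?_, ?_, ?_⟩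
    · have hp := (pairwise_idxOf_lt pvPreferred hprefnd).filter (fun k => ks.contains k)
      rw [List.Pairwise.imp_mem]
      refine hp.imp ?_
      intro a b hab ha hb
      rw [hord] at ha hb
      rw [hr1 a (List.mem_filter.mp ha).1, hr1 b (List.mem_filter.mp hb).1]
      exact_mod_cast hab
    · have hp := (pairwise_idxOf_lt ks hnd).filter (fun k => !pvPreferred.contains k)
      rw [List.Pairwise.imp_mem]
      refine hp.imp ?_
      intro a b hab ha hb
      obtain ⟨ha1, ha2⟩ := List.mem_filter.mp ha
      obtain ⟨hb1, hb2⟩ := List.mem_filter.mp hb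
      rw [hr2 a ha1 (by simpa [List.contains_eq_mem] using ha2),
          hr2 b hb1 (by simpa [List.contains_eq_mem] using hb2)]
      omega
    · intro a ha b hb
      obtain ⟨hb1, hb2⟩ := List.mem_filter.mp hb
      rw [hord] at ha
      obtain ⟨ha1, _⟩ := List.mem_filter.mp ha
      rw [hr1 a ha1, hr2 b hb1 (by simpa [List.contains_eq_mem] using hb2)]
      have h16 : List.idxOf a pvPreferred < pvPreferred.length :=
        List.idxOf_lt_length_of_mem ha1
      omega

-- ===== VERDICT (by name: the statement is the Claim_ definition above) =====
theorem select_evaluation_sections_fields_py_spec : Claim_equal_select_evaluation_sections_fields_py := by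
  intro rows _
  unfold Spec_select_evaluation_sections_fields_py
  unfold select_evaluation_sections_fields_py select_evaluation_sections_fields_py_alt
  by_cases h : rows = []
  · simp [h]
  · rw [if_neg h, if_neg h]
    have hks :
        rows.foldl (fun acc r =>
            r.foldl (fun acc kv => if acc.contains kv.1 then acc else acc ++ [kv.1]) acc) []
          = PySem.List.dedup (rows.flatMap (fun r => r.map Prod.fst)) := by
      rw [allkeys_eq_ofList, PySem.List.dedup_eq_ofList, PySem.Set.ofList_eq_foldl]
    have hnd : (PySem.List.dedup (rows.flatMap (fun r => r.map Prod.fst))).Nodup := by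
      rw [PySem.List.dedup_eq_ofList]; exact PySem.Set.nodup_ofList _
    simp only [hks]
    rw [foldl_add_nodup _ _ hnd]
    exact (sorted_rank_eq _ hnd).symm
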